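-- pv_equiv track=rewrite | github.com/liuyijiang1994/opinion_pair_extraction | score.py | get_overlap_relation
-- ===== SOURCE A (Python) =====
-- def get_overlap_relation(relations):
--     overlap_relations = []
--     for idx1 in range(len(relations) - 1):
--         for idx2 in range(idx1 + 1, len(relations)):
--             relation1 = relations[idx1]
--             relation2 = relations[idx2]
--             if (relation1[0] == relation2[0] and relation1[1] == relation2[1]) or (
--                     relation1[2] == relation2[3] and relation1[2] == relation2[3]):
--                 overlap_relations.append(relation1)
--     return overlap_relations
-- ===== SOURCE B (Python) =====
-- def get_overlap_relation(relations):
--     """A relation r1 overlaps a later relation r2 when both have the same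
--     first two fields, or when r1's field 2 equals r2's field 3.
--
--     One backward pass keeps, for the suffix of relations already seen,
--     counts of their leading pairs, of their field-3 values, and of both
--     together; the number of later relations overlapping r is then
--     by_pair + by_field3 - by_both (inclusion-exclusion), with no inner scan.
--     """
--     by_pair = {}    # (x, y) -> how many later relations start with (x, y)
--     by_field3 = {}  # v -> how many later relations have field 3 == v
--     by_both = {}    # (x, y, v) -> how many later relations have both
--     counts = []
--     for r in reversed(relations):
--         counts.append(by_pair.get((r[0], r[1]), 0)
--                       + by_field3.get(r[2], 0)
--                       - by_both.get((r[0], r[1], r[2]), 0))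
--         by_pair[(r[0], r[1])] = by_pair.get((r[0], r[1]), 0) + 1
--         by_field3[r[3]] = by_field3.get(r[3], 0) + 1
--         by_both[(r[0], r[1], r[3])] = by_both.get((r[0], r[1], r[3]), 0) + 1
--     counts.reverse()
--     out = []
--     for r, c in zip(relations, counts):
--         out += [r] * c
--     return out
-- ===== Notes on version B (the rewrite author's own statement) =====
-- stated objective: alternative
-- what changed: Replaced the all-pairs double loop by a single backward pass keeping suffix hash-counts of each relation's leading pair (r[0],r[1]), of its field-3 value, and of both together, reading off each relation's number of overlapping later relations by inclusion-exclusion instead of an inner scan; Pre_ excludes inputs containing a relation with fewer than 4 fields, on which B raises IndexError while A can still return via short-circuiting.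
-- outside the precondition, e.g. on get_overlap_relation([[1, 1, 1], [1, 1, 1, 1]]): A returns [[1, 1, 1]], B raises IndexError; on get_overlap_relation([[9]]): A returns [], B raises IndexError
import Mathlib
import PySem

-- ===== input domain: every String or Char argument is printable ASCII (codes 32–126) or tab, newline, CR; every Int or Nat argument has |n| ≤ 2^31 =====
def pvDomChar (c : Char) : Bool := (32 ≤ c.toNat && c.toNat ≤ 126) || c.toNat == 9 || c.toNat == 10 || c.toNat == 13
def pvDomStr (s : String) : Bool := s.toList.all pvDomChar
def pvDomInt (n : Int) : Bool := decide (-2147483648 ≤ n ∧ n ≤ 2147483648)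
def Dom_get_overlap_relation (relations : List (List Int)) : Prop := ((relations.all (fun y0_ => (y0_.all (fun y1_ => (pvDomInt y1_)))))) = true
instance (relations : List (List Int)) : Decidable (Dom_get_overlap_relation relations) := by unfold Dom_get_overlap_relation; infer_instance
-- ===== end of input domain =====

-- B replaces A's all-pairs scan by one backward pass with suffix hash-counts and
-- inclusion-exclusion per relation (an alternative algorithm; no speed claim is made).

-- ===== PORT A =====
def get_overlap_relation (relations : List (List Int)) : List (List Int) :=
  (PySem.List.pyRange 0 ((relations.length : Int) - 1) 1).foldl (fun overlap_relations idx1 =>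
    (PySem.List.pyRange (idx1 + 1) (relations.length : Int) 1).foldl (fun acc idx2 =>
      let relation1 := PySem.List.pyGetD relations idx1 []
      let relation2 := PySem.List.pyGetD relations idx2 []
      if ((PySem.List.pyGetD relation1 0 0 == PySem.List.pyGetD relation2 0 0)
            && (PySem.List.pyGetD relation1 1 0 == PySem.List.pyGetD relation2 1 0))
         || ((PySem.List.pyGetD relation1 2 0 == PySem.List.pyGetD relation2 3 0)
            && (PySem.List.pyGetD relation1 2 0 == PySem.List.pyGetD relation2 3 0))
      then acc ++ [relation1] else acc) overlap_relations) []

-- ===== PORT B =====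
-- one step of B's backward loop: state = (by_pair, by_field3, by_both, counts)
def altStep
    (st : PySem.Dict (Int × Int) Int × PySem.Dict Int Int × PySem.Dict (Int × Int × Int) Int × List Int)
    (r : List Int) :
    PySem.Dict (Int × Int) Int × PySem.Dict Int Int × PySem.Dict (Int × Int × Int) Int × List Int :=
  let (by_pair, by_field3, by_both, counts) := st
  let r0 := PySem.List.pyGetD r 0 0
  let r1 := PySem.List.pyGetD r 1 0
  let r2 := PySem.List.pyGetD r 2 0
  let r3 := PySem.List.pyGetD r 3 0
  let c := by_pair.getD (r0, r1) 0 + by_field3.getD r2 0 - by_both.getD (r0, r1, r2) 0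
  (by_pair.modify (r0, r1) 0 (· + 1),
   by_field3.modify r3 0 (· + 1),
   by_both.modify (r0, r1, r3) 0 (· + 1),
   counts ++ [c])

def get_overlap_relation_alt (relations : List (List Int)) : List (List Int) :=
  let st := relations.reverse.foldl altStep (PySem.Dict.empty, PySem.Dict.empty, PySem.Dict.empty, [])
  let counts := st.2.2.2.reverse
  (relations.zip counts).foldl (fun out rc => out ++ List.replicate rc.2.toNat rc.1) []

-- ===== PRECONDITION & SPEC =====
-- Pre_ excludes inputs where some row has fewer than 4 fields, on which B raises IndexError;
-- it is slightly conservative: A, whose loops skip rows when there are < 2 of them and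
-- short-circuit the comparisons, can still return on a few such inputs, which are excluded.
def Pre_get_overlap_relation (relations : List (List Int)) : Prop :=
  relations = [] ∨ ∀ r ∈ relations, 4 ≤ r.length
instance (relations : List (List Int)) : Decidable (Pre_get_overlap_relation relations) := by
  unfold Pre_get_overlap_relation; infer_instance
def pvWitness_get_overlap_relation : List (List Int) := [[1, 2, 3, 4], [1, 2, 5, 6], [0, 0, 6, 3]]
def Spec_get_overlap_relation (relations : List (List Int)) (out : List (List Int)) : Prop := out = get_overlap_relation_alt relations
instance (relations : List (List Int)) (out : List (List Int)) : Decidable (Spec_get_overlap_relation relations out) := by unfold Spec_get_overlap_relation; infer_instance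

-- ===== CLAIM (what is proved, stated in full; the proofs are below) =====
def Claim_equal_get_overlap_relation : Prop := ∀ (relations : List (List Int)), Dom_get_overlap_relation relations → Pre_get_overlap_relation relations → Spec_get_overlap_relation relations (get_overlap_relation relations)

-- ===== LEMMAS AND PROOFS =====

-- the overlap test of A (the duplicated second conjunct collapsed)
def ovCond (r1 r2 : List Int) : Bool :=
  ((PySem.List.pyGetD r1 0 0 == PySem.List.pyGetD r2 0 0)
    && (PySem.List.pyGetD r1 1 0 == PySem.List.pyGetD r2 1 0))
  || (PySem.List.pyGetD r1 2 0 == PySem.List.pyGetD r2 3 0)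

-- common normal form of both programs
def ovSpec : List (List Int) → List (List Int)
  | [] => []
  | r :: rs => List.replicate (rs.countP (ovCond r)) r ++ ovSpec rs

def ovCounts : List (List Int) → List Int
  | [] => []
  | r :: rs => ((rs.countP (ovCond r) : Int)) :: ovCounts rs

def ovRep (relations : List (List Int)) (i : Int) : List (List Int) :=
  List.replicate ((relations.drop (i + 1).toNat).countP (ovCond (PySem.List.pyGetD relations i [])))
    (PySem.List.pyGetD relations i [])

theorem flatMap_congr' {α β : Type} (l : List α) (f g : α → List β)
    (h : ∀ x ∈ l, f x = g x) : l.flatMap f = l.flatMap g := by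
  induction l with
  | nil => rfl
  | cons x l ih =>
    simp only [List.flatMap_cons, h x (by simp), ih (fun y hy => h y (by simp [hy]))]

theorem A_eq_flat (relations : List (List Int)) :
    get_overlap_relation relations
      = (PySem.List.pyRange 0 ((relations.length : Int) - 1) 1).flatMap (ovRep relations) := by
  unfold get_overlap_relation
  rw [PySem.List.foldl_congr_mem _ _ (fun acc i => acc ++ ovRep relations i) _ ?_]
  · rw [PySem.List.foldl_append_eq_flatMap]; simp
  · intro acc i hi
    have hi0 : 0 ≤ i := (PySem.List.mem_pyRange_one.mp hi).1
    rw [PySem.List.foldl_congr_mem _ _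
      (fun acc2 idx2 => if ovCond (PySem.List.pyGetD relations i [])
        (PySem.List.pyGetD relations idx2 []) then
          acc2 ++ [PySem.List.pyGetD relations i []] else acc2) _ ?_]
    · rw [PySem.List.foldl_append_if]
      congr 1
      rw [List.map_const', ovRep, ← List.countP_eq_length_filter]
      congr 1
      rw [← PySem.List.map_pyGetD_pyRange' relations [] (show (0 : Int) ≤ i + 1 by omega),
        List.countP_map]
      rfl
    · intro acc2 j hj
      simp only [ovCond, Bool.and_self]
      rfl

theorem A_flat_ext (relations : List (List Int)) :
    (PySem.List.pyRange 0 ((relations.length : Int) - 1) 1).flatMap (ovRep relations)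
      = (PySem.List.pyRange 0 (relations.length : Int) 1).flatMap (ovRep relations) := by
  rcases relations with _ | ⟨r, rs⟩
  · rfl
  · have hm : ((r :: rs).length : Int) - 1 = (rs.length : Int) := by
      simp
    have h1 : (0 : Int) ≤ (rs.length : Int) := by positivity
    have h2 : ((r :: rs).length : Int) = (rs.length : Int) + 1 := by
      simp
    rw [hm, h2, PySem.List.pyRange_one_succ_right h1, List.flatMap_append]
    have hlast : ovRep (r :: rs) (rs.length : Int) = [] := by
      rw [ovRep]
      have : (((rs.length : Int)) + 1).toNat = (r :: rs).length := by simp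
      rw [this, List.drop_length]
      simp
    simp [hlast]

theorem flat_eq_spec (relations : List (List Int)) :
    (PySem.List.pyRange 0 (relations.length : Int) 1).flatMap (ovRep relations)
      = ovSpec relations := by
  induction relations with
  | nil => rfl
  | cons r rs ih =>
    have hcons : PySem.List.pyRange 0 ((r :: rs).length : Int) 1
        = 0 :: PySem.List.pyRange 1 ((r :: rs).length : Int) 1 :=
      PySem.List.pyRange_one_cons (by exact_mod_cast Nat.succ_pos rs.length)
    rw [hcons, List.flatMap_cons]
    have hhead : ovRep (r :: rs) 0 = List.replicate (rs.countP (ovCond r)) r := by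
      simp [ovRep, PySem.List.pyGetD_zero_cons]
    have htail : (PySem.List.pyRange 1 ((r :: rs).length : Int) 1).flatMap (ovRep (r :: rs))
        = (PySem.List.pyRange 0 (rs.length : Int) 1).flatMap (ovRep rs) := by
      rw [PySem.List.pyRange_one 1, PySem.List.pyRange_one 0, List.flatMap_map, List.flatMap_map]
      have hlen : (((r :: rs).length : Int) - 1).toNat = ((rs.length : Int) - 0).toNat := by
        simp
      rw [hlen]
      apply flatMap_congr'
      intro k hk
      have : (1 : Int) + (k : Int) = ((k + 1 : Nat) : Int) := by push_cast; ring
      rw [this, ovRep, ovRep]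
      have e1 : PySem.List.pyGetD (r :: rs) ((k + 1 : Nat) : Int) [] = PySem.List.pyGetD rs ((k : Nat) : Int) [] := by
        rw [PySem.List.pyGetD_natCast, PySem.List.pyGetD_natCast, List.getD_cons_succ]
      have e2 : (((k + 1 : Nat) : Int) + 1).toNat = k + 2 := by omega
      have e3 : (((0 : Int) + (k : Nat)) + 1).toNat = k + 1 := by omega
      rw [e1, e2, e3, List.drop_succ_cons]
      norm_num
    rw [hhead, htail, ih, ovSpec]

theorem A_eq_ovSpec (relations : List (List Int)) :
    get_overlap_relation relations = ovSpec relations := by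
  rw [A_eq_flat, A_flat_ext, flat_eq_spec]

-- ---- B side ----

def altF (rs : List (List Int)) :
    PySem.Dict (Int × Int) Int × PySem.Dict Int Int × PySem.Dict (Int × Int × Int) Int × List Int :=
  rs.reverse.foldl altStep (PySem.Dict.empty, PySem.Dict.empty, PySem.Dict.empty, [])

theorem altF_cons (r : List Int) (rs : List (List Int)) :
    altF (r :: rs) = altStep (altF rs) r := by
  simp [altF, List.foldl_append]

theorem counter_append_singleton {κ : Type} [BEq κ] (xs : List κ) (x : κ) :
    PySem.Dict.counter (xs ++ [x]) = (PySem.Dict.counter xs).modify x 0 (· + 1) := by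
  rw [PySem.Dict.counter_eq_foldl, PySem.Dict.counter_eq_foldl, List.foldl_append]
  rfl

theorem altF_pc (rs : List (List Int)) :
    (altF rs).1 = PySem.Dict.counter ((rs.map (fun z =>
      (PySem.List.pyGetD z 0 0, PySem.List.pyGetD z 1 0))).reverse) := by
  induction rs with
  | nil => simp [altF, PySem.Dict.counter_eq_foldl]
  | cons r rs ih =>
    rw [altF_cons, List.map_cons, List.reverse_cons, counter_append_singleton, ← ih]
    rfl

theorem altF_vc (rs : List (List Int)) :
    (altF rs).2.1 = PySem.Dict.counter ((rs.map (fun z => PySem.List.pyGetD z 3 0)).reverse) := by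
  induction rs with
  | nil => simp [altF, PySem.Dict.counter_eq_foldl]
  | cons r rs ih =>
    rw [altF_cons, List.map_cons, List.reverse_cons, counter_append_singleton, ← ih]
    rfl

theorem altF_bc (rs : List (List Int)) :
    (altF rs).2.2.1 = PySem.Dict.counter ((rs.map (fun z =>
      (PySem.List.pyGetD z 0 0, PySem.List.pyGetD z 1 0, PySem.List.pyGetD z 3 0))).reverse) := by
  induction rs with
  | nil => simp [altF, PySem.Dict.counter_eq_foldl]
  | cons r rs ih =>
    rw [altF_cons, List.map_cons, List.reverse_cons, counter_append_singleton, ← ih]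
    rfl

-- inclusion–exclusion for countP, over Int
theorem countP_incl_excl {α : Type} (l : List α) (p q : α → Bool) :
    (l.countP p : Int) + l.countP q - l.countP (fun x => p x && q x)
      = l.countP (fun x => p x || q x) := by
  induction l with
  | nil => simp
  | cons x l ih =>
    simp only [List.countP_cons]
    cases hp : p x <;> cases hq : q x <;> simp only [Bool.and_self, Bool.or_self,
      Bool.and_true, Bool.and_false, Bool.or_true, Bool.or_false, if_true] <;>
      push_cast <;> omega

theorem altF_counts (rs : List (List Int)) :
    (altF rs).2.2.2 = (ovCounts rs).reverse := by
  induction rs with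
  | nil => rfl
  | cons r rs ih =>
    rw [altF_cons]
    have hstep : (altStep (altF rs) r).2.2.2 = (altF rs).2.2.2 ++
        [(altF rs).1.getD (PySem.List.pyGetD r 0 0, PySem.List.pyGetD r 1 0) 0
          + (altF rs).2.1.getD (PySem.List.pyGetD r 2 0) 0
          - (altF rs).2.2.1.getD
              (PySem.List.pyGetD r 0 0, PySem.List.pyGetD r 1 0, PySem.List.pyGetD r 2 0) 0] := by
      rfl
    rw [hstep, ih, altF_pc, altF_vc, altF_bc,
      PySem.Dict.getD_counter, PySem.Dict.getD_counter, PySem.Dict.getD_counter]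
    have hc : ((List.count (PySem.List.pyGetD r 0 0, PySem.List.pyGetD r 1 0)
          ((rs.map (fun z => (PySem.List.pyGetD z 0 0, PySem.List.pyGetD z 1 0))).reverse) : Int)
        + (List.count (PySem.List.pyGetD r 2 0)
          ((rs.map (fun z => PySem.List.pyGetD z 3 0)).reverse) : Int)
        - (List.count (PySem.List.pyGetD r 0 0, PySem.List.pyGetD r 1 0, PySem.List.pyGetD r 2 0)
          ((rs.map (fun z =>
            (PySem.List.pyGetD z 0 0, PySem.List.pyGetD z 1 0, PySem.List.pyGetD z 3 0))).reverse) : Int))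
        = (rs.countP (ovCond r) : Int) := by
      rw [List.count_reverse, List.count_reverse, List.count_reverse,
        List.count_eq_countP, List.count_eq_countP, List.count_eq_countP,
        List.countP_map, List.countP_map, List.countP_map]
      have hboth : rs.countP ((fun x => x ==
            (PySem.List.pyGetD r 0 0, PySem.List.pyGetD r 1 0, PySem.List.pyGetD r 2 0)) ∘
            (fun z => (PySem.List.pyGetD z 0 0, PySem.List.pyGetD z 1 0, PySem.List.pyGetD z 3 0)))
          = rs.countP (fun z =>
            ((fun x => x == (PySem.List.pyGetD r 0 0, PySem.List.pyGetD r 1 0)) ∘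
              (fun z => (PySem.List.pyGetD z 0 0, PySem.List.pyGetD z 1 0))) z
            && ((fun x => x == PySem.List.pyGetD r 2 0) ∘
              (fun z => PySem.List.pyGetD z 3 0)) z) := by
        apply List.countP_congr
        intro z _
        simp only [Function.comp_apply, Bool.and_eq_true, beq_iff_eq, Prod.mk.injEq]
        omega
      rw [hboth, countP_incl_excl]
      congr 1
      apply List.countP_congr
      intro z _
      simp only [Function.comp_apply, ovCond, Bool.or_eq_true, Bool.and_eq_true, beq_iff_eq,
        Prod.mk.injEq]
      omega
    rw [hc, ovCounts, List.reverse_cons]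

theorem zip_ovCounts_fold (rs : List (List Int)) (acc : List (List Int)) :
    (rs.zip (ovCounts rs)).foldl (fun out rc => out ++ List.replicate rc.2.toNat rc.1) acc
      = acc ++ ovSpec rs := by
  induction rs generalizing acc with
  | nil => simp [ovCounts, ovSpec]
  | cons r rs ih =>
    rw [ovCounts, List.zip_cons_cons, List.foldl_cons, ih, ovSpec]
    rw [Int.toNat_natCast, List.append_assoc]

theorem B_eq_ovSpec (relations : List (List Int)) :
    get_overlap_relation_alt relations = ovSpec relations := by
  show (relations.zip ((altF relations).2.2.2.reverse)).foldl
      (fun out rc => out ++ List.replicate rc.2.toNat rc.1) [] = ovSpec relations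
  rw [altF_counts, List.reverse_reverse, zip_ovCounts_fold]
  rfl

-- ===== VERDICT (by name: the statement is the Claim_ definition above) =====
theorem get_overlap_relation_spec : Claim_equal_get_overlap_relation := by
  intro relations _ _
  unfold Spec_get_overlap_relation
  rw [A_eq_ovSpec, B_eq_ovSpec]
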